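-- pv_equiv track=rewrite | github.com/AICardiologist/FoundationRelativity | paper 66/p66_compute_v2.py | enumerate_bqf_classes
-- ===== SOURCE A (Python) =====
-- import csv, json, math, os, sys
--
-- def enumerate_bqf_classes(D):
--     """All reduced pos-def BQFs of discriminant D < 0."""
--     if D >= 0: return []
--     absD = abs(D)
--     forms = []
--     a_max = math.isqrt(absD // 3) + 1
--     for a in range(1, a_max + 1):
--         for b in range(-a, a + 1):
--             num = b * b - D  # b² + |D|
--             if num <= 0 or num % (4 * a) != 0: continue
--             c = num // (4 * a)
--             if c < a: continue
--             if a == c and b < 0: continue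
--             if abs(b) == a and b < 0: continue
--             forms.append((a, b, c))
--     return forms
-- ===== SOURCE B (Python) =====
-- import math
--
-- def enumerate_bqf_classes(D):
--     """All reduced pos-def BQFs of discriminant D < 0.
--
--     Instead of scanning the full (a, b) grid, iterate over b and enumerate
--     divisor pairs (a, c) of (b*b - D) // 4; the reduction conditions
--     (-a < b <= a, a <= c, and b >= 0 when a == c) bound a automatically,
--     so no explicit a_max cut-off on a is needed.  Sorting by (a, b)
--     (c is determined by them) reproduces the grid-scan order exactly."""
--     if D >= 0: return []
--     forms = []
--     b_max = math.isqrt(-D // 3) + 1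
--     for b in range(-b_max, b_max + 1):
--         M = b * b - D
--         if M % 4 != 0: continue
--         N = M // 4
--         for a in range(1, math.isqrt(N) + 1):
--             if N % a != 0: continue
--             c = N // a
--             if not (-a < b <= a): continue
--             if a == c and b < 0: continue
--             forms.append((a, b, c))
--     forms.sort(key=lambda t: (t[0], t[1]))
--     return forms
-- ===== Notes on version B (the rewrite author's own statement) =====
-- stated objective: alternative
-- what changed: Replaces the full (a,b)-grid scan with an outer loop over b that enumerates divisor pairs (a,c) of the quarter of b*b-D (skipping b where b*b-D is not a multiple of four, and needing no explicit a_max cut-off on a since the reduction condition a<=c bounds a), then sorts by (a,b) to reproduce the grid order.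
import Mathlib
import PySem

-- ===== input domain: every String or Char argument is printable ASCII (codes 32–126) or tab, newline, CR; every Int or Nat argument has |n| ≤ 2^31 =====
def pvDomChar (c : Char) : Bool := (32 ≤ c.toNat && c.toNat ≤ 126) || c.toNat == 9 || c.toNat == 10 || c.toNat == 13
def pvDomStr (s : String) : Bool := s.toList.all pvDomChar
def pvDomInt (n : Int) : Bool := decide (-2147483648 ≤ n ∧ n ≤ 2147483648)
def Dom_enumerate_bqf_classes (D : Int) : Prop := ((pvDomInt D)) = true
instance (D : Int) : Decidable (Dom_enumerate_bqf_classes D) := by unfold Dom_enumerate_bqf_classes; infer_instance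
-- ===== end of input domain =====

-- B replaces A's full (a,b)-grid scan by an outer loop on b with divisor enumeration of (b²-D)/4, then sorts by (a,b); alternative decomposition (measured modestly faster, same asymptotics).

-- shared helper: math.isqrt for n ≥ 0, ported by hand (fuel-structural so the kernel can reduce it); exact floor square root on Nat
def pvIsqrtFuel : Nat → Nat → Nat
  | 0, _ => 0
  | f + 1, n =>
      if n < 2 then n
      else
        let r := 2 * pvIsqrtFuel f (n / 4)
        if (r + 1) * (r + 1) ≤ n then r + 1 else r

def pvIsqrt (n : Nat) : Nat := pvIsqrtFuel n n

-- ===== PORT A =====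
def enumerate_bqf_classes (D : Int) : List (Int × Int × Int) :=
  if D ≥ 0 then []
  else
    let absD : Int := |D|
    let a_max : Int := (pvIsqrt ((PySem.Int.floordiv absD 3).toNat) : Int) + 1
    (PySem.List.pyRange 1 (a_max + 1)).foldl (fun forms a =>
      (PySem.List.pyRange (-a) (a + 1)).foldl (fun forms b =>
        let num := b * b - D
        if num ≤ 0 ∨ PySem.Int.mod num (4 * a) ≠ 0 then forms
        else
          let c := PySem.Int.floordiv num (4 * a)
          if c < a then forms
          else if a = c ∧ b < 0 then forms
          else if |b| = a ∧ b < 0 then forms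
          else forms ++ [(a, b, c)]) forms) []

-- ===== PORT B =====
def enumerate_bqf_classes_alt (D : Int) : List (Int × Int × Int) :=
  if D ≥ 0 then []
  else
    let b_max : Int := (pvIsqrt ((PySem.Int.floordiv (-D) 3).toNat) : Int) + 1
    let forms := (PySem.List.pyRange (-b_max) (b_max + 1)).foldl (fun forms b =>
      let M := b * b - D
      if PySem.Int.mod M 4 ≠ 0 then forms
      else
        let N := PySem.Int.floordiv M 4
        (PySem.List.pyRange 1 ((pvIsqrt N.toNat : Int) + 1)).foldl (fun forms a =>
          if PySem.Int.mod N a ≠ 0 then forms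
          else
            let c := PySem.Int.floordiv N a
            if ¬(-a < b ∧ b ≤ a) then forms
            else if a = c ∧ b < 0 then forms
            else forms ++ [(a, b, c)]) forms) []
    PySem.List.sorted forms (fun t => toLex (t.1, t.2.1))

-- ===== PRECONDITION & SPEC =====
def Spec_enumerate_bqf_classes (D : Int) (out : List (Int × Int × Int)) : Prop := out = enumerate_bqf_classes_alt D
instance (D : Int) (out : List (Int × Int × Int)) : Decidable (Spec_enumerate_bqf_classes D out) := by unfold Spec_enumerate_bqf_classes; infer_instance

-- ===== CLAIM (what is proved, stated in full; the proofs are below) =====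
def Claim_equal_enumerate_bqf_classes : Prop := ∀ (D : Int), Dom_enumerate_bqf_classes D → Spec_enumerate_bqf_classes D (enumerate_bqf_classes D)

-- ===== LEMMAS AND PROOFS =====

-- pvIsqrt computes Nat.sqrt
theorem pvIsqrtFuel_eq (f n : Nat) (h : n ≤ f) : pvIsqrtFuel f n = Nat.sqrt n := by
  induction f generalizing n with
  | zero => interval_cases n; simp [pvIsqrtFuel]
  | succ f ih =>
    rw [pvIsqrtFuel]
    by_cases h2 : n < 2
    · interval_cases n <;> simp
    · simp only [if_neg h2]
      rw [ih (n / 4) (by omega)]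
      set s := Nat.sqrt (n / 4) with hs
      have h1 : s * s ≤ n / 4 := Nat.sqrt_le (n / 4)
      have h2' : n / 4 < (s + 1) * (s + 1) := Nat.lt_succ_sqrt (n / 4)
      have hexp : (2 * s + 1 + 1) * (2 * s + 1 + 1) = 4 * ((s + 1) * (s + 1)) := by ring
      have hexp2 : (2 * s) * (2 * s) = 4 * (s * s) := by ring
      by_cases hb : (2 * s + 1) * (2 * s + 1) ≤ n
      · simp only [if_pos hb]
        refine le_antisymm (Nat.le_sqrt.mpr hb) ?_
        have hn : n < (2 * s + 1 + 1) * (2 * s + 1 + 1) := by omega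
        have := Nat.sqrt_lt.mpr hn
        omega
      · simp only [if_neg hb]
        refine le_antisymm (Nat.le_sqrt.mpr (by omega)) ?_
        have : Nat.sqrt n < 2 * s + 1 := Nat.sqrt_lt.mpr (by omega)
        omega

theorem pvIsqrt_eq (n : Nat) : pvIsqrt n = Nat.sqrt n := pvIsqrtFuel_eq n n le_rfl

-- the reduced-form predicate both enumerations realise
def pvP (D a b c : Int) : Prop :=
  1 ≤ a ∧ -a < b ∧ b ≤ a ∧ a ≤ c ∧ 4 * a * c = b * b - D ∧ (a = c → 0 ≤ b)

def pvAmax (D : Int) : Int := (Nat.sqrt ((PySem.Int.floordiv (-D) 3).toNat) : Int) + 1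

def pvKey (t : Int × Int × Int) : Lex (Int × Int) := toLex (t.1, t.2.1)
def pvKeyB (t : Int × Int × Int) : Lex (Int × Int) := toLex (t.2.1, t.1)

def pvAcceptA (D a b : Int) : Bool :=
  decide (¬(b * b - D ≤ 0 ∨ PySem.Int.mod (b * b - D) (4 * a) ≠ 0) ∧
          ¬(PySem.Int.floordiv (b * b - D) (4 * a) < a) ∧
          ¬(a = PySem.Int.floordiv (b * b - D) (4 * a) ∧ b < 0) ∧
          ¬(|b| = a ∧ b < 0))

def pvAcceptB (D b a : Int) : Bool :=
  decide (¬(PySem.Int.mod (PySem.Int.floordiv (b * b - D) 4) a ≠ 0) ∧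
          ¬¬(-a < b ∧ b ≤ a) ∧
          ¬(a = PySem.Int.floordiv (PySem.Int.floordiv (b * b - D) 4) a ∧ b < 0))

def pvListA (D : Int) : List (Int × Int × Int) :=
  (PySem.List.pyRange 1 (pvAmax D + 1)).flatMap (fun a =>
    ((PySem.List.pyRange (-a) (a + 1)).filter (pvAcceptA D a)).map
      (fun b => (a, b, PySem.Int.floordiv (b * b - D) (4 * a))))

def pvBlockB (D b : Int) : List (Int × Int × Int) :=
  if PySem.Int.mod (b * b - D) 4 ≠ 0 then []
  else
    ((PySem.List.pyRange 1 ((pvIsqrt (PySem.Int.floordiv (b * b - D) 4).toNat : Int) + 1)).filter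
        (pvAcceptB D b)).map
      (fun a => (a, b, PySem.Int.floordiv (PySem.Int.floordiv (b * b - D) 4) a))

def pvListB (D : Int) : List (Int × Int × Int) :=
  (PySem.List.pyRange (-pvAmax D) (pvAmax D + 1)).flatMap (pvBlockB D)

theorem pvA_eq (D : Int) (hD : ¬ D ≥ 0) : enumerate_bqf_classes D = pvListA D := by
  have habs : |D| = -D := abs_of_neg (by omega)
  unfold enumerate_bqf_classes pvListA pvAmax
  simp only [if_neg hD, habs, pvIsqrt_eq]
  have hinner : ∀ (a : Int) (forms : List (Int × Int × Int)),
      (PySem.List.pyRange (-a) (a + 1)).foldl (fun forms b =>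
        let num := b * b - D
        if num ≤ 0 ∨ PySem.Int.mod num (4 * a) ≠ 0 then forms
        else
          let c := PySem.Int.floordiv num (4 * a)
          if c < a then forms
          else if a = c ∧ b < 0 then forms
          else if |b| = a ∧ b < 0 then forms
          else forms ++ [(a, b, c)]) forms
      = forms ++ ((PySem.List.pyRange (-a) (a + 1)).filter (pvAcceptA D a)).map
          (fun b => (a, b, PySem.Int.floordiv (b * b - D) (4 * a))) := by
    intro a forms
    rw [show (fun (forms : List (Int × Int × Int)) (b : Int) =>
        let num := b * b - D
        if num ≤ 0 ∨ PySem.Int.mod num (4 * a) ≠ 0 then forms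
        else
          let c := PySem.Int.floordiv num (4 * a)
          if c < a then forms
          else if a = c ∧ b < 0 then forms
          else if |b| = a ∧ b < 0 then forms
          else forms ++ [(a, b, c)])
      = (fun forms b => if pvAcceptA D a b then
          forms ++ [(a, b, PySem.Int.floordiv (b * b - D) (4 * a))] else forms) from ?_,
      PySem.List.foldl_append_if]
    funext forms b
    simp only [pvAcceptA, decide_eq_true_eq]
    split_ifs <;> tauto
  rw [show (fun (forms : List (Int × Int × Int)) (a : Int) =>
      (PySem.List.pyRange (-a) (a + 1)).foldl (fun forms b =>
        let num := b * b - D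
        if num ≤ 0 ∨ PySem.Int.mod num (4 * a) ≠ 0 then forms
        else
          let c := PySem.Int.floordiv num (4 * a)
          if c < a then forms
          else if a = c ∧ b < 0 then forms
          else if |b| = a ∧ b < 0 then forms
          else forms ++ [(a, b, c)]) forms)
    = (fun forms a => forms ++ ((PySem.List.pyRange (-a) (a + 1)).filter (pvAcceptA D a)).map
          (fun b => (a, b, PySem.Int.floordiv (b * b - D) (4 * a))))
    from funext₂ (fun forms a => hinner a forms),
    PySem.List.foldl_append_eq_flatMap, List.nil_append]

theorem pvAlt_eq (D : Int) (hD : ¬ D ≥ 0) :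
    enumerate_bqf_classes_alt D = PySem.List.sorted (pvListB D) pvKey := by
  unfold enumerate_bqf_classes_alt pvListB pvAmax pvKey
  simp only [if_neg hD, pvIsqrt_eq]
  have hinner : ∀ (b N : Int) (forms : List (Int × Int × Int)),
      (PySem.List.pyRange 1 ((Nat.sqrt N.toNat : Int) + 1)).foldl (fun forms a =>
        if PySem.Int.mod N a ≠ 0 then forms
        else
          if ¬(-a < b ∧ b ≤ a) then forms
          else if a = PySem.Int.floordiv N a ∧ b < 0 then forms
          else forms ++ [(a, b, PySem.Int.floordiv N a)]) forms
      = forms ++ ((PySem.List.pyRange 1 ((Nat.sqrt N.toNat : Int) + 1)).filter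
          (fun a => decide (¬(PySem.Int.mod N a ≠ 0) ∧ ¬¬(-a < b ∧ b ≤ a) ∧
            ¬(a = PySem.Int.floordiv N a ∧ b < 0)))).map
          (fun a => (a, b, PySem.Int.floordiv N a)) := by
    intro b N forms
    rw [show (fun (forms : List (Int × Int × Int)) (a : Int) =>
        if PySem.Int.mod N a ≠ 0 then forms
        else
          if ¬(-a < b ∧ b ≤ a) then forms
          else if a = PySem.Int.floordiv N a ∧ b < 0 then forms
          else forms ++ [(a, b, PySem.Int.floordiv N a)])
      = (fun forms a => if decide (¬(PySem.Int.mod N a ≠ 0) ∧ ¬¬(-a < b ∧ b ≤ a) ∧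
            ¬(a = PySem.Int.floordiv N a ∧ b < 0)) then
          forms ++ [(a, b, PySem.Int.floordiv N a)] else forms) from ?_,
      PySem.List.foldl_append_if]
    funext forms a
    simp only [decide_eq_true_eq]
    split_ifs <;> tauto
  rw [show (fun (forms : List (Int × Int × Int)) (b : Int) =>
      if PySem.Int.mod (b * b - D) 4 ≠ 0 then forms
      else
        (PySem.List.pyRange 1 ((Nat.sqrt (PySem.Int.floordiv (b * b - D) 4).toNat : Int) + 1)).foldl
          (fun forms a =>
            if PySem.Int.mod (PySem.Int.floordiv (b * b - D) 4) a ≠ 0 then forms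
            else
              if ¬(-a < b ∧ b ≤ a) then forms
              else if a = PySem.Int.floordiv (PySem.Int.floordiv (b * b - D) 4) a ∧ b < 0 then forms
              else forms ++ [(a, b, PySem.Int.floordiv (PySem.Int.floordiv (b * b - D) 4) a)]) forms)
    = (fun forms b => forms ++ pvBlockB D b) from ?_,
    PySem.List.foldl_append_eq_flatMap, List.nil_append]
  funext forms b
  by_cases hm : PySem.Int.mod (b * b - D) 4 ≠ 0
  · simp only [pvBlockB, if_pos hm, List.append_nil]
  · simp only [pvBlockB, if_neg hm, pvIsqrt_eq]
    rw [hinner b (PySem.Int.floordiv (b * b - D) 4) forms]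
    rfl

theorem pv_divmod (x d c : Int) (hd : 0 < d) :
    (PySem.Int.mod x d = 0 ∧ PySem.Int.floordiv x d = c) ↔ d * c = x := by
  rw [PySem.Int.mod_eq_zero_iff_dvd, PySem.Int.floordiv_eq_ediv_of_pos hd]
  constructor
  · rintro ⟨hdvd, rfl⟩
    exact Int.mul_ediv_cancel' hdvd
  · rintro rfl
    exact ⟨Dvd.intro _ rfl, Int.mul_ediv_cancel_left _ (by omega)⟩

theorem pv_sqrt_le (a N : Int) (h0 : 0 ≤ N) (h1 : 0 < a) (h : a ≤ (Nat.sqrt N.toNat : Int)) :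
    a * a ≤ N := by
  have h' : a.toNat ≤ Nat.sqrt N.toNat := by omega
  have e : ((a.toNat : Nat) : Int) = a := Int.toNat_of_nonneg h1.le
  calc a * a = (a.toNat : Int) * (a.toNat : Int) := by rw [e]
    _ ≤ (N.toNat : Int) := by exact_mod_cast Nat.le_sqrt.mp h'
    _ = N := Int.toNat_of_nonneg h0

theorem pv_sq_le_of (a b : Int) (h1 : -a < b) (h2 : b ≤ a) : b * b ≤ a * a := by nlinarith

theorem pv_le_sqrt (a N : Int) (h0 : 0 ≤ a) (h : a * a ≤ N) : a ≤ (Nat.sqrt N.toNat : Int) := by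
  have ha2 : ((a.toNat * a.toNat : Nat) : Int) = a * a := by
    push_cast [Int.toNat_of_nonneg h0]; ring
  have h' : a.toNat * a.toNat ≤ N.toNat := by
    calc a.toNat * a.toNat = (a * a).toNat := by rw [← ha2, Int.toNat_natCast]
      _ ≤ N.toNat := Int.toNat_le_toNat h
  have hs := Nat.le_sqrt.mpr h'
  calc a = (a.toNat : Int) := (Int.toNat_of_nonneg h0).symm
    _ ≤ _ := by exact_mod_cast hs

theorem pv_le_amax (D a b c : Int) (_hD : D < 0) (h : pvP D a b c) : a + 1 ≤ pvAmax D := by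
  obtain ⟨h1, h2, h3, h4, h5, h6⟩ := h
  have hbb : b * b ≤ a * a := pv_sq_le_of a b h2 h3
  have hac : a * a ≤ a * c := mul_le_mul_of_nonneg_left h4 (by omega)
  have h3a : 3 * (a * a) ≤ -D := by nlinarith
  have hdiv : a * a ≤ PySem.Int.floordiv (-D) 3 := by
    rw [PySem.Int.floordiv_eq_ediv_of_pos (by norm_num)]
    exact (Int.le_ediv_iff_mul_le (by norm_num)).mpr (by linarith)
  have := pv_le_sqrt a _ (by nlinarith) hdiv
  unfold pvAmax
  omega

theorem pv_mem_A (D : Int) (hD : D < 0) (x : Int × Int × Int) :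
    x ∈ pvListA D ↔ pvP D x.1 x.2.1 x.2.2 := by
  obtain ⟨a, b, c⟩ := x
  simp only [pvListA, List.mem_flatMap, List.mem_map, List.mem_filter, pvAcceptA,
    PySem.List.mem_pyRange_one, decide_eq_true_eq, Prod.mk.injEq, not_or, not_lt, not_and,
    not_le]
  constructor
  · rintro ⟨a', ⟨ha1, ha2⟩, b', ⟨⟨hb1, hb2⟩, ⟨hnum, hmod⟩, hca, hce, hba⟩, rfl, rfl, rfl⟩
    have h4 : (0:Int) < 4 * a' := by omega
    have hc : 4 * a' * PySem.Int.floordiv (b' * b' - D) (4 * a') = b' * b' - D :=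
      (pv_divmod (b' * b' - D) (4 * a') (PySem.Int.floordiv (b' * b' - D) (4 * a')) h4).mp
        ⟨by omega, rfl⟩
    refine ⟨ha1, ?_, by omega, hca, hc, hce⟩
    rcases lt_or_eq_of_le hb1 with h | h
    · exact h
    · exfalso
      have habs : |b'| = a' := by
        rw [← h, abs_neg, abs_of_nonneg (by omega : (0:Int) ≤ a')]
      have := hba habs
      omega
  · rintro ⟨h1, h2, h3, h4, h5, h6⟩
    obtain ⟨hm0, hfd⟩ := (pv_divmod (b * b - D) (4 * a) c (by omega)).mpr h5
    have hamax := pv_le_amax D a b c hD ⟨h1, h2, h3, h4, h5, h6⟩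
    refine ⟨a, ⟨h1, by omega⟩, b, ⟨⟨by omega, by omega⟩, ⟨by nlinarith, by simp [hm0]⟩,
      by rw [hfd]; exact h4, fun he => h6 (he.trans hfd), fun habs => ?_⟩, rfl, rfl, hfd⟩
    rcases abs_cases b with ⟨he, -⟩ | ⟨he, -⟩ <;> omega

theorem pv_blockB_mem (D b : Int) (hD : D < 0) (x : Int × Int × Int) :
    x ∈ pvBlockB D b ↔ pvP D x.1 x.2.1 x.2.2 ∧ x.2.1 = b := by
  obtain ⟨a, b', c⟩ := x
  unfold pvBlockB
  by_cases hm : PySem.Int.mod (b * b - D) 4 ≠ 0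
  · rw [if_pos hm]
    simp only [List.not_mem_nil, false_iff, not_and]
    rintro ⟨h1, h2, h3, h4, h5, h6⟩ rfl
    exact hm ((PySem.Int.mod_eq_zero_iff_dvd _ _).mpr ⟨a * c, by linarith⟩)
  · rw [if_neg hm]
    rw [not_not] at hm
    have h4N : (4:Int) * PySem.Int.floordiv (b * b - D) 4 = b * b - D :=
      (pv_divmod _ 4 _ (by norm_num)).mp ⟨hm, rfl⟩
    set N := PySem.Int.floordiv (b * b - D) 4 with hN
    have hN0 : 0 ≤ N := by nlinarith
    simp only [List.mem_map, List.mem_filter, PySem.List.mem_pyRange_one, pvAcceptB, ← hN,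
      decide_eq_true_eq, Prod.mk.injEq, not_lt, not_not, not_and, pvIsqrt_eq]
    constructor
    · intro hh
      obtain ⟨a', ha, heq⟩ := hh
      obtain ⟨⟨ha1, ha2⟩, hmodN, hrange, hce⟩ := ha
      obtain ⟨he1, he2, he3⟩ := heq
      subst he1; subst he2; subst he3
      have hfd := (pv_divmod N a' (PySem.Int.floordiv N a') (by omega)).mp ⟨hmodN, rfl⟩
      have haa : a' * a' ≤ N := pv_sqrt_le a' N hN0 (by omega) (by omega)
      have hac : a' ≤ PySem.Int.floordiv N a' :=
        le_of_mul_le_mul_left (a := a') (by linarith) (by omega)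
      refine ⟨⟨ha1, ?_, ?_, hac, by linarith, hce⟩, rfl⟩ <;> tauto
    · rintro ⟨⟨h1, h2, h3, h4, h5, h6⟩, rfl⟩
      have hNac : a * c = N := by linarith
      obtain ⟨hm2, hfd⟩ := (pv_divmod N a c (by omega)).mpr hNac
      have hsq : a ≤ (Nat.sqrt N.toNat : Int) :=
        pv_le_sqrt a N (by omega) (by nlinarith)
      exact ⟨a, ⟨⟨h1, by omega⟩, hm2, fun f => f h2 h3, fun he => h6 (he.trans hfd)⟩,
        rfl, rfl, hfd⟩

theorem pv_mem_B (D : Int) (hD : D < 0) (x : Int × Int × Int) :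
    x ∈ pvListB D ↔ pvP D x.1 x.2.1 x.2.2 := by
  simp only [pvListB, List.mem_flatMap, PySem.List.mem_pyRange_one]
  constructor
  · rintro ⟨b, _, hx⟩
    exact ((pv_blockB_mem D b hD x).mp hx).1
  · intro h
    refine ⟨x.2.1, ?_, (pv_blockB_mem D x.2.1 hD x).mpr ⟨h, rfl⟩⟩
    have := pv_le_amax D x.1 x.2.1 x.2.2 hD h
    obtain ⟨h1, h2, h3, _⟩ := h
    omega

theorem pv_pairwise_range (a b : Int) : List.Pairwise (· < ·) (PySem.List.pyRange a b) := by
  rw [PySem.List.pyRange_one]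
  exact List.pairwise_map.mpr (List.pairwise_lt_range.imp (fun h => by omega))

theorem pv_pairwise_A (D : Int) :
    List.Pairwise (fun x y => pvKey x < pvKey y) (pvListA D) := by
  unfold pvListA
  rw [List.pairwise_flatMap]
  constructor
  · intro a _
    refine List.pairwise_map.mpr (((pv_pairwise_range _ _).filter _).imp ?_)
    intro b b' hb
    exact Prod.Lex.toLex_lt_toLex.mpr (Or.inr ⟨rfl, hb⟩)
  · refine (pv_pairwise_range _ _).imp ?_
    rintro a a' ha x hx y hy
    obtain ⟨b, -, rfl⟩ := List.mem_map.mp hx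
    obtain ⟨b', -, rfl⟩ := List.mem_map.mp hy
    exact Prod.Lex.toLex_lt_toLex.mpr (Or.inl ha)

theorem pv_blockB_snd (D b : Int) (x : Int × Int × Int) (hx : x ∈ pvBlockB D b) :
    x.2.1 = b := by
  unfold pvBlockB at hx
  split at hx
  · simp at hx
  · obtain ⟨a, -, rfl⟩ := List.mem_map.mp hx
    rfl

theorem pv_pairwise_B (D : Int) :
    List.Pairwise (fun x y => pvKeyB x < pvKeyB y) (pvListB D) := by
  unfold pvListB
  rw [List.pairwise_flatMap]
  constructor
  · intro b _
    unfold pvBlockB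
    split
    · exact List.Pairwise.nil
    · refine List.pairwise_map.mpr (((pv_pairwise_range _ _).filter _).imp ?_)
      intro a a' ha
      exact Prod.Lex.toLex_lt_toLex.mpr (Or.inr ⟨rfl, ha⟩)
  · refine (pv_pairwise_range _ _).imp ?_
    rintro b b' hb x hx y hy
    rw [← pv_blockB_snd D b x hx, ← pv_blockB_snd D b' y hy] at hb
    exact Prod.Lex.toLex_lt_toLex.mpr (Or.inl hb)

theorem pv_nodup {l : List (Int × Int × Int)} {k : Int × Int × Int → Lex (Int × Int)}
    (h : List.Pairwise (fun x y => k x < k y) l) : l.Nodup :=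
  h.imp (fun hlt heq => absurd (heq ▸ hlt) (lt_irrefl _))

theorem pv_main (D : Int) : enumerate_bqf_classes D = enumerate_bqf_classes_alt D := by
  by_cases hD : D ≥ 0
  · simp [enumerate_bqf_classes, enumerate_bqf_classes_alt, hD]
  · have hD' : D < 0 := lt_of_not_ge hD
    rw [pvA_eq D hD, pvAlt_eq D hD]
    refine (PySem.List.sorted_eq_of_perm_of_pairwise_lt (pvListB D) (pvListA D) pvKey ?_ ?_).symm
    · exact (List.perm_ext_iff_of_nodup (pv_nodup (pv_pairwise_A D)) (pv_nodup (pv_pairwise_B D))).mpr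
        (fun x => (pv_mem_A D hD' x).trans (pv_mem_B D hD' x).symm)
    · exact pv_pairwise_A D

-- ===== VERDICT (by name: the statement is the Claim_ definition above) =====
theorem enumerate_bqf_classes_spec : Claim_equal_enumerate_bqf_classes := by
  intro D _
  unfold Spec_enumerate_bqf_classes
  exact pv_main D
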